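-- pv_equiv track=rewrite | github.com/Terhands/AdventOfCode | 2020/10/solution.py | total_configurations
-- ===== SOURCE A (Python) =====
-- def total_configurations(current_adapter, d_tree, connection_store):
--     if current_adapter in connection_store:
--         return connection_store[current_adapter]
--
--     total = 1 if d_tree[current_adapter] == [] else 0
--     for next_adapter in d_tree[current_adapter]:
--         total += total_configurations(next_adapter, d_tree, connection_store)
--     connection_store[current_adapter] = total
--     return total
-- ===== SOURCE B (Python) =====
-- def total_configurations(current_adapter, d_tree, connection_store):
--     # Iterative bottom-up fixpoint instead of memoized recursion: repeatedly fill in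
--     # every node whose children are all already counted, until nothing changes.
--     # Return-value equivalence only: A memoizes into connection_store in place, B does not mutate it.
--     store = dict(connection_store)
--     changed = True
--     while changed:
--         changed = False
--         for k, children in d_tree.items():
--             if k not in store and all(c in store for c in children):
--                 store[k] = 1 if children == [] else sum(store[c] for c in children)
--                 changed = True
--     return store[current_adapter]
-- ===== Notes on version B (the rewrite author's own statement) =====
-- stated objective: alternative
-- what changed: Replaces the memoized top-down recursion by an iterative bottom-up fixpoint: repeated passes over d_tree fill in every node whose children are already counted, until a pass changes nothing; no recursion and no call stack.
import Mathlib
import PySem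

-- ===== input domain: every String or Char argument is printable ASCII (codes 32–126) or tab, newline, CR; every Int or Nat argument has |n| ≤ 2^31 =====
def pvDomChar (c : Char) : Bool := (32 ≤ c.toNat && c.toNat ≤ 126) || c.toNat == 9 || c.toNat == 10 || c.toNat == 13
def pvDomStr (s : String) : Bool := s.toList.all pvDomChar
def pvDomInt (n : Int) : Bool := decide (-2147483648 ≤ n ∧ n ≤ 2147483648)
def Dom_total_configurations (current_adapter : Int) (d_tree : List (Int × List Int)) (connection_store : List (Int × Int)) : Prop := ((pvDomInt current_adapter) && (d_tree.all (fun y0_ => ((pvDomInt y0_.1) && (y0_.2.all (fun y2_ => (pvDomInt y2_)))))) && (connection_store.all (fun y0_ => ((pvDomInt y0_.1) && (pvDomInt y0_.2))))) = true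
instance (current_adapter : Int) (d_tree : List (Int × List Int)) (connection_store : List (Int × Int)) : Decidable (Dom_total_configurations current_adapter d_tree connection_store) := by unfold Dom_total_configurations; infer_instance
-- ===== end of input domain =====

-- B replaces A's memoized top-down recursion by an iterative bottom-up fixpoint: repeated passes
-- over d_tree fill in every node whose children are already counted, until a pass changes nothing
-- (objective: alternative decomposition, no recursion). Return-value equivalence only: Python A
-- memoizes into connection_store in place, Python B leaves its arguments untouched.

-- ===== PORT A =====
-- A's recursion threads the mutated memo dict; fuel = d_tree.length + 2 bounds the recursion
-- depth under Pre_; the fuel-exhausted and missing-key (Python KeyError) fallbacks are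
-- unreachable under Pre_.
def goA (dt : PySem.Dict Int (List Int)) : Nat → Int → PySem.Dict Int Int → Int × PySem.Dict Int Int
  | 0, _, cs => (0, cs)
  | fuel+1, k, cs =>
    match cs.get? k with
    | some v => (v, cs)                         -- if current_adapter in connection_store: return it
    | none =>
      match dt.get? k with
      | none => (0, cs)                         -- Python: KeyError on d_tree[current_adapter]; excluded by Pre_
      | some children =>
        let init : Int := if children = [] then 1 else 0
        let r := children.foldl (fun acc c =>
          let s := goA dt fuel c acc.2
          (acc.1 + s.1, s.2)) (init, cs)        -- for next_adapter in d_tree[...]: total += recursion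
        (r.1, r.2.insert k r.1)                 -- connection_store[current_adapter] = total

def total_configurations (current_adapter : Int) (d_tree : List (Int × List Int)) (connection_store : List (Int × Int)) : Int :=
  (goA (PySem.Dict.ofList d_tree) (d_tree.length + 2) current_adapter (PySem.Dict.ofList connection_store)).1

-- ===== PORT B =====
-- the 'for k, children in d_tree.items():' loop of one pass (store, changed flag threaded)
def passB (st : PySem.Dict Int Int) (changed : Bool) : List (Int × List Int) → PySem.Dict Int Int × Bool
  | [] => (st, changed)
  | (k, children) :: rest =>
    if st.contains k = false ∧ children.all st.contains then
      passB (st.insert k (if children = [] then 1 else (children.map (fun c => st.getD c 0)).sum)) true rest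
    else
      passB st changed rest

-- 'while changed:' — fuel = d_tree.length + 1 always suffices (every pass with changed=True
-- inserts at least one new d_tree key), so the fuel-exhausted fallback is unreachable
def loopB (items : List (Int × List Int)) : Nat → PySem.Dict Int Int → PySem.Dict Int Int
  | 0, st => st
  | n+1, st =>
    match passB st false items with
    | (st', true) => loopB items n st'
    | (st', false) => st'

def total_configurations_alt (current_adapter : Int) (d_tree : List (Int × List Int)) (connection_store : List (Int × Int)) : Int :=
  let dt := PySem.Dict.ofList d_tree
  let store := loopB dt.items (d_tree.length + 1) (PySem.Dict.ofList connection_store)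
  store.getD current_adapter 0                  -- Python: KeyError when missing; excluded by Pre_

-- ===== PRECONDITION & SPEC =====
-- 'k is solvable within n steps': k is memoized, or k is a d_tree key all of whose children are
-- solvable within n-1 steps — the standard well-foundedness condition of A's recursion. It
-- computes no output values and no memo.
def okT (dt : PySem.Dict Int (List Int)) (cs : PySem.Dict Int Int) : Nat → Int → Bool
  | 0, k => cs.contains k
  | n+1, k => cs.contains k ||
      (match dt.get? k with
       | some ch => ch.all (okT dt cs n)
       | none => false)

-- Pre_ excludes exactly the inputs on which Python A raises (KeyError on an adapter missing from
-- d_tree, or unbounded recursion on a cycle): the start node must be solvable, and depth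
-- d_tree.length + 1 covers every solvable node since solvable nodes of positive rank are distinct
-- d_tree keys.
def Pre_total_configurations (current_adapter : Int) (d_tree : List (Int × List Int)) (connection_store : List (Int × Int)) : Prop :=
  okT (PySem.Dict.ofList d_tree) (PySem.Dict.ofList connection_store) (d_tree.length + 1) current_adapter = true
instance (current_adapter : Int) (d_tree : List (Int × List Int)) (connection_store : List (Int × Int)) : Decidable (Pre_total_configurations current_adapter d_tree connection_store) := by unfold Pre_total_configurations; infer_instance

def pvWitness_total_configurations : Int × (List (Int × List Int)) × (List (Int × Int)) :=
  (1, [(1, [2, 3]), (2, [3]), (3, [])], [])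

def Spec_total_configurations (current_adapter : Int) (d_tree : List (Int × List Int)) (connection_store : List (Int × Int)) (out : Int) : Prop := out = total_configurations_alt current_adapter d_tree connection_store
instance (current_adapter : Int) (d_tree : List (Int × List Int)) (connection_store : List (Int × Int)) (out : Int) : Decidable (Spec_total_configurations current_adapter d_tree connection_store out) := by unfold Spec_total_configurations; infer_instance

-- ===== CLAIM =====
def Claim_equal_total_configurations : Prop := ∀ (current_adapter : Int) (d_tree : List (Int × List Int)) (connection_store : List (Int × Int)), Dom_total_configurations current_adapter d_tree connection_store → Pre_total_configurations current_adapter d_tree connection_store → Spec_total_configurations current_adapter d_tree connection_store (total_configurations current_adapter d_tree connection_store)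

-- ===== LEMMAS AND PROOFS =====

-- the canonical value of node k at depth n: memoized value, else 1 for a leaf / sum of the
-- children's canonical values when they are all defined at depth n-1
def cvT (dt : PySem.Dict Int (List Int)) (cs : PySem.Dict Int Int) : Nat → Int → Option Int
  | 0, k => cs.get? k
  | n+1, k =>
    match cs.get? k with
    | some v => some v
    | none =>
      match dt.get? k with
      | none => none
      | some ch =>
        if ch.all (fun c => (cvT dt cs n c).isSome) then
          some (if ch = [] then 1 else (ch.map (fun c => (cvT dt cs n c).getD 0)).sum)
        else none

lemma cvT_unfold (dt : PySem.Dict Int (List Int)) (cs : PySem.Dict Int Int) (n : Nat) (k : Int) :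
    cvT dt cs (n+1) k =
      (match cs.get? k with
       | some v => some v
       | none =>
         match dt.get? k with
         | none => none
         | some ch =>
           if ch.all (fun c => (cvT dt cs n c).isSome) then
             some (if ch = [] then 1 else (ch.map (fun c => (cvT dt cs n c).getD 0)).sum)
           else none) := rfl

lemma cvT_succ (dt : PySem.Dict Int (List Int)) (cs : PySem.Dict Int Int) :
    ∀ (n : Nat) (k : Int) (v : Int), cvT dt cs n k = some v → cvT dt cs (n+1) k = some v := by
  intro n
  induction n with
  | zero =>
    intro k v h
    simp only [cvT] at h ⊢
    rw [h]
  | succ n ih =>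
    intro k v h
    rw [cvT_unfold] at h
    rw [cvT_unfold]
    cases hcs : cs.get? k with
    | some w => simp only [hcs] at h ⊢; exact h
    | none =>
      simp only [hcs] at h ⊢
      cases hdt : dt.get? k with
      | none => exact absurd (by simpa only [hdt] using h) (by simp : ¬ (none : Option Int) = some v)
      | some ch =>
        simp only [hdt] at h ⊢
        by_cases hall : ch.all (fun c => (cvT dt cs n c).isSome) = true
        · have hall' : ch.all (fun c => (cvT dt cs (n+1) c).isSome) = true := by
            rw [List.all_eq_true] at hall ⊢
            intro c hc
            obtain ⟨w, hw⟩ := Option.isSome_iff_exists.mp (by simpa using hall c hc)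
            simp [ih c w hw]
          rw [if_pos hall] at h
          rw [if_pos hall']
          rw [← h]
          congr 1
          by_cases hnil : ch = []
          · simp [hnil]
          · simp only [hnil, if_false]
            refine congrArg List.sum (List.map_congr_left ?_)
            intro c hc
            obtain ⟨w, hw⟩ := Option.isSome_iff_exists.mp
              (by simpa using (List.all_eq_true.mp hall) c hc)
            rw [hw, ih c w hw]
        · rw [if_neg hall] at h
          exact absurd h (by simp)

lemma cvT_mono (dt : PySem.Dict Int (List Int)) (cs : PySem.Dict Int Int)
    {n m : Nat} (hnm : n ≤ m) {k v : Int} (h : cvT dt cs n k = some v) :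
    cvT dt cs m k = some v := by
  induction m with
  | zero => have : n = 0 := by omega
            subst this; exact h
  | succ m ih =>
    by_cases hle : n ≤ m
    · exact cvT_succ dt cs m k v (ih hle)
    · have : n = m + 1 := by omega
      subst this; exact h

lemma cvT_unique (dt : PySem.Dict Int (List Int)) (cs : PySem.Dict Int Int)
    {n m : Nat} {k v w : Int} (h1 : cvT dt cs n k = some v) (h2 : cvT dt cs m k = some w) :
    v = w := by
  have ha := cvT_mono dt cs (Nat.le_max_left n m) h1
  have hb := cvT_mono dt cs (Nat.le_max_right n m) h2
  rw [ha] at hb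
  exact (Option.some.injEq _ _ ▸ hb)

lemma okT_cvT (dt : PySem.Dict Int (List Int)) (cs : PySem.Dict Int Int) :
    ∀ (n : Nat) (k : Int), okT dt cs n k = true → ∃ v, cvT dt cs n k = some v := by
  intro n
  induction n with
  | zero =>
    intro k h
    simp only [okT] at h
    rw [PySem.Dict.contains_eq_isSome_get?] at h
    obtain ⟨v, hv⟩ := Option.isSome_iff_exists.mp h
    exact ⟨v, by simpa [cvT] using hv⟩
  | succ n ih =>
    intro k h
    simp only [okT, Bool.or_eq_true] at h
    rw [cvT_unfold]
    cases hcs : cs.get? k with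
    | some v => exact ⟨v, by simp⟩
    | none =>
      simp only []
      have hcsc : cs.contains k = false := by
        rw [PySem.Dict.contains_eq_isSome_get?, hcs]; rfl
      rcases h with h | h
      · rw [hcsc] at h; exact absurd h (by simp)
      · cases hdt : dt.get? k with
        | none => rw [hdt] at h; exact absurd h (by simp)
        | some ch =>
          rw [hdt] at h
          simp only []
          have hall : ch.all (fun c => (cvT dt cs n c).isSome) = true := by
            rw [List.all_eq_true] at h ⊢
            intro c hc
            obtain ⟨v, hv⟩ := ih c (by simpa using h c hc)
            simp [hv]
          rw [if_pos hall]
          exact ⟨_, rfl⟩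

-- a memo dict is 'correct' when every entry carries its node's canonical value
def CorrT (dt : PySem.Dict Int (List Int)) (cs st : PySem.Dict Int Int) : Prop :=
  ∀ j v, st.get? j = some v → ∃ n, cvT dt cs n j = some v

-- ---- A side: goA returns canonical values and keeps the memo correct ----
lemma goA_spec (dt : PySem.Dict Int (List Int)) (cs : PySem.Dict Int Int) :
    ∀ (fuel : Nat) (k : Int) (mem : PySem.Dict Int Int),
      CorrT dt cs mem →
      (∀ j, cs.contains j = true → mem.contains j = true) →
      ∀ (nk : Nat), okT dt cs nk k = true → nk < fuel →
      (∃ n, cvT dt cs n k = some (goA dt fuel k mem).1) ∧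
      CorrT dt cs (goA dt fuel k mem).2 ∧
      (∀ j, mem.contains j = true → (goA dt fuel k mem).2.contains j = true) := by
  intro fuel
  induction fuel with
  | zero => intro k mem _ _ nk _ h; omega
  | succ fuel ih =>
    intro k mem hcorr hsub nk hok hfuel
    cases hmem : mem.get? k with
    | some v =>
      have h1 : goA dt (fuel+1) k mem = (v, mem) := by rw [goA, hmem]
      exact ⟨by rw [h1]; exact hcorr k v hmem, by rw [h1]; exact hcorr, by rw [h1]; exact fun j h => h⟩
    | none =>
      have hmemc : mem.contains k = false := by
        rw [PySem.Dict.contains_eq_isSome_get?, hmem]; rfl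
      have hcsc : cs.contains k = false := by
        by_contra hx
        simp only [Bool.not_eq_false] at hx
        rw [hsub k hx] at hmemc
        exact absurd hmemc (by simp)
      obtain ⟨m, rfl⟩ : ∃ m, nk = m + 1 := by
        cases nk with
        | zero => rw [okT, hcsc] at hok; exact absurd hok (by simp)
        | succ m => exact ⟨m, rfl⟩
      simp only [okT, hcsc, Bool.false_or] at hok
      cases hdt : dt.get? k with
      | none => rw [hdt] at hok; exact absurd hok (by simp)
      | some ch =>
        rw [hdt] at hok
        have h1 : goA dt (fuel+1) k mem =
            (let init : Int := if ch = [] then 1 else 0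
             let r := ch.foldl (fun acc c =>
               let s := goA dt fuel c acc.2
               (acc.1 + s.1, s.2)) (init, mem)
             (r.1, r.2.insert k r.1)) := by rw [goA, hmem, hdt]
        -- the children loop adds the children's canonical values
        have hfold : ∀ (chl : List Int), (∀ c ∈ chl, okT dt cs m c = true) →
            ∀ (acc : Int × PySem.Dict Int Int), CorrT dt cs acc.2 →
            (∀ j, cs.contains j = true → acc.2.contains j = true) →
            (chl.foldl (fun acc c =>
              let s := goA dt fuel c acc.2
              (acc.1 + s.1, s.2)) acc).1
              = acc.1 + (chl.map (fun c => (cvT dt cs m c).getD 0)).sum ∧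
            CorrT dt cs (chl.foldl (fun acc c =>
              let s := goA dt fuel c acc.2
              (acc.1 + s.1, s.2)) acc).2 ∧
            (∀ j, acc.2.contains j = true → (chl.foldl (fun acc c =>
              let s := goA dt fuel c acc.2
              (acc.1 + s.1, s.2)) acc).2.contains j = true) := by
          intro chl
          induction chl with
          | nil => intro _ acc h1 _; exact ⟨by simp, h1, fun j h => h⟩
          | cons c rest ihc =>
            intro hcl acc ha1 ha2
            have hokc := hcl c (List.mem_cons_self ..)
            have hm : m < fuel := by omega
            obtain ⟨⟨n1, hv1⟩, hc1, hc3⟩ := ih c acc.2 ha1 ha2 m hokc hm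
            obtain ⟨w, hw⟩ := okT_cvT dt cs m c hokc
            have hval : (goA dt fuel c acc.2).1 = (cvT dt cs m c).getD 0 := by
              rw [hw]
              exact cvT_unique dt cs hv1 hw
            have ha2' : ∀ j, cs.contains j = true → (goA dt fuel c acc.2).2.contains j = true :=
              fun j h => hc3 j (ha2 j h)
            obtain ⟨hr1, hr2, hr3⟩ := ihc (fun x hx => hcl x (List.mem_cons_of_mem c hx))
              (acc.1 + (goA dt fuel c acc.2).1, (goA dt fuel c acc.2).2) hc1 ha2'
            refine ⟨?_, hr2, fun j h => hr3 j (hc3 j h)⟩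
            simp only [List.foldl_cons, List.map_cons, List.sum_cons]
            rw [hr1, hval]
            ring
        have hch : ∀ c ∈ ch, okT dt cs m c = true := fun c hc => by
          simpa using (List.all_eq_true.mp hok) c hc
        obtain ⟨hr1, hr2, hr3⟩ := hfold ch hch ((if ch = [] then 1 else 0 : Int), mem) hcorr hsub
        have hall : ch.all (fun c => (cvT dt cs m c).isSome) = true := by
          rw [List.all_eq_true]
          intro c hc
          obtain ⟨w, hw⟩ := okT_cvT dt cs m c (hch c hc)
          simp [hw]
        have hcv : cvT dt cs (m+1) k =
            some (if ch = [] then 1 else (ch.map (fun c => (cvT dt cs m c).getD 0)).sum) := by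
          rw [cvT_unfold]
          have hcs : cs.get? k = none := by
            rw [PySem.Dict.contains_eq_isSome_get?] at hcsc
            cases h : cs.get? k with
            | none => rfl
            | some v => rw [h] at hcsc; exact absurd hcsc (by simp)
          simp only [hcs, hdt, if_pos hall]
        have hval : (ch.foldl (fun acc c =>
              let s := goA dt fuel c acc.2
              (acc.1 + s.1, s.2)) ((if ch = [] then 1 else 0 : Int), mem)).1
            = (if ch = [] then 1 else (ch.map (fun c => (cvT dt cs m c).getD 0)).sum) := by
          rw [hr1]
          by_cases hnil : ch = [] <;> simp [hnil]
        refine ⟨⟨m+1, ?_⟩, ?_, ?_⟩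
        · rw [h1]; simp only []
          rw [hval, hcv]
        · rw [h1]; simp only []
          intro j v hj
          rw [PySem.Dict.get?_insert] at hj
          split at hj
          · rename_i hjk
            subst hjk
            refine ⟨m+1, ?_⟩
            rw [hcv, ← hj, hval]
          · exact hr2 j v hj
        · rw [h1]; simp only []
          intro j hj
          rw [PySem.Dict.contains_insert, hr3 j hj]
          simp

-- ---- B side ----
lemma passB_flag (st : PySem.Dict Int Int) :
    ∀ (l : List (Int × List Int)), (passB st true l).2 = true := by
  intro l
  induction l generalizing st with
  | nil => rfl
  | cons p rest ih =>
    obtain ⟨k, children⟩ := p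
    rw [passB]
    split
    · exact ih _
    · exact ih st

lemma passB_spec (dt : PySem.Dict Int (List Int)) (cs : PySem.Dict Int Int)
    (hnd : dt.keys.Nodup) :
    ∀ (l : List (Int × List Int)), (∀ p ∈ l, p ∈ dt.items) →
    ∀ (st : PySem.Dict Int Int) (changed : Bool),
      CorrT dt cs st →
      (∀ j, cs.contains j = true → st.contains j = true) →
      CorrT dt cs (passB st changed l).1 ∧
      (∀ j, st.contains j = true → (passB st changed l).1.contains j = true) ∧
      ((passB st changed l).2 = false →
        (passB st changed l).1 = st ∧
        ∀ p ∈ l, st.contains p.1 = true ∨ p.2.all st.contains = false) ∧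
      (changed = false → (passB st changed l).2 = true →
        ∃ j, st.contains j = false ∧ (passB st changed l).1.contains j = true ∧ j ∈ dt.keys) := by
  intro l
  induction l with
  | nil =>
    intro _ st changed hcorr hsub
    refine ⟨hcorr, fun j h => h, fun _ => ⟨rfl, by simp⟩, fun hc h => ?_⟩
    rw [passB] at h
    rw [hc] at h
    exact absurd h (by simp)
  | cons p rest ih =>
    intro hl st changed hcorr hsub
    obtain ⟨k, children⟩ := p
    have hpd : (k, children) ∈ dt.items := hl (k, children) (List.mem_cons_self ..)
    have hdt : dt.get? k = some children := PySem.Dict.get?_of_mem_items dt hpd hnd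
    rw [passB]
    split
    · rename_i hguard
      obtain ⟨hkc, hallc⟩ := hguard
      set v : Int := if children = [] then 1 else (children.map (fun c => st.getD c 0)).sum with hv
      -- the inserted value is canonical: children are all stored, hence canonical
      have hex : ∀ (chl : List Int), (∀ c ∈ chl, st.contains c = true) →
          ∃ N, ∀ c ∈ chl, (cvT dt cs N c).isSome = true ∧ (cvT dt cs N c).getD 0 = st.getD c 0 := by
        intro chl
        induction chl with
        | nil => intro _; exact ⟨0, by simp⟩
        | cons c crest ihc =>
          intro hc
          obtain ⟨N, hN⟩ := ihc (fun x hx => hc x (List.mem_cons_of_mem c hx))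
          have hcc := hc c (List.mem_cons_self ..)
          rw [PySem.Dict.contains_eq_isSome_get?] at hcc
          obtain ⟨w, hw⟩ := Option.isSome_iff_exists.mp hcc
          obtain ⟨n, hn⟩ := hcorr c w hw
          refine ⟨max n N, ?_⟩
          intro x hx
          rcases List.mem_cons.mp hx with rfl | hx'
          · have := cvT_mono dt cs (Nat.le_max_left n N) hn
            rw [this]
            constructor
            · rfl
            · rw [PySem.Dict.getD_eq_get?_getD, hw]
          · obtain ⟨h1, h2⟩ := hN x hx'
            obtain ⟨w', hw'⟩ := Option.isSome_iff_exists.mp h1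
            have := cvT_mono dt cs (Nat.le_max_right n N) hw'
            rw [this]
            rw [hw'] at h2
            exact ⟨rfl, h2⟩
      obtain ⟨N, hN⟩ := hex children (fun c hc => by
        simpa using (List.all_eq_true.mp hallc) c hc)
      have hcvk : cvT dt cs (N+1) k = some v := by
        rw [cvT_unfold]
        have hcs : cs.get? k = none := by
          have : cs.contains k = false := by
            by_contra hx
            simp only [Bool.not_eq_false] at hx
            rw [hsub k hx] at hkc
            exact absurd hkc (by simp)
          rw [PySem.Dict.contains_eq_isSome_get?] at this
          cases h : cs.get? k with
          | none => rfl
          | some w => rw [h] at this; exact absurd this (by simp)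
        have hall : children.all (fun c => (cvT dt cs N c).isSome) = true := by
          rw [List.all_eq_true]
          intro c hc
          simpa using (hN c hc).1
        simp only [hcs, hdt, if_pos hall, hv]
        congr 1
        by_cases hnil : children = []
        · simp [hnil]
        · simp only [hnil, if_false]
          exact congrArg List.sum (List.map_congr_left (fun c hc => (hN c hc).2))
      have hcorr' : CorrT dt cs (st.insert k v) := by
        intro j w hj
        rw [PySem.Dict.get?_insert] at hj
        split at hj
        · rename_i hjk
          subst hjk
          exact ⟨N+1, by rw [hcvk, hj]⟩
        · exact hcorr j w hj
      have hsub' : ∀ j, cs.contains j = true → (st.insert k v).contains j = true := by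
        intro j h
        rw [PySem.Dict.contains_insert, hsub j h]
        simp
      obtain ⟨hi1, hi2, hi3, _⟩ := ih (fun x hx => hl x (List.mem_cons_of_mem _ hx))
        (st.insert k v) true hcorr' hsub'
      refine ⟨hi1, ?_, ?_, ?_⟩
      · intro j hj
        apply hi2
        rw [PySem.Dict.contains_insert, hj]
        simp
      · intro hfalse
        rw [passB_flag] at hfalse
        exact absurd hfalse (by simp)
      · intro _ _
        refine ⟨k, hkc, ?_, PySem.Dict.mem_keys_of_mem_items dt hpd⟩
        apply hi2
        exact PySem.Dict.contains_insert_self st k v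
    · rename_i hguard
      obtain ⟨hi1, hi2, hi3, hi4⟩ := ih (fun x hx => hl x (List.mem_cons_of_mem _ hx))
        st changed hcorr hsub
      refine ⟨hi1, hi2, ?_, hi4⟩
      intro hfalse
      obtain ⟨he, hp⟩ := hi3 hfalse
      refine ⟨he, ?_⟩
      intro p hp'
      rcases List.mem_cons.mp hp' with rfl | hp''
      · simp only [not_and] at hguard
        by_cases h1 : st.contains k = false
        · right
          by_contra hx
          simp only [Bool.not_eq_false] at hx
          exact hguard h1 hx
        · left
          simpa using h1
      · exact hp p hp''

lemma countP_strict {α : Type} (l : List α) (p q : α → Bool)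
    (h1 : ∀ x ∈ l, q x = true → p x = true) (j : α) (hj : j ∈ l)
    (hpj : p j = true) (hqj : q j = false) : l.countP q < l.countP p := by
  induction l with
  | nil => simp at hj
  | cons a t ih =>
    rw [List.countP_cons, List.countP_cons]
    have hmono : t.countP q ≤ t.countP p :=
      List.countP_mono_left (fun x hx => h1 x (List.mem_cons_of_mem a hx))
    rcases List.mem_cons.mp hj with rfl | hjt
    · simp [hpj, hqj]; omega
    · have := ih (fun x hx => h1 x (List.mem_cons_of_mem a hx)) hjt
      by_cases hqa : q a = true
      · have hpa := h1 a (List.mem_cons_self ..) hqa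
        simp [hqa, hpa]; omega
      · simp only [Bool.not_eq_true] at hqa
        simp [hqa]; split <;> omega

lemma loopB_spec (dt : PySem.Dict Int (List Int)) (cs : PySem.Dict Int Int)
    (hnd : dt.keys.Nodup) :
    ∀ (fuel : Nat) (st : PySem.Dict Int Int),
      CorrT dt cs st →
      (∀ j, cs.contains j = true → st.contains j = true) →
      dt.keys.countP (fun j => !st.contains j) < fuel →
      CorrT dt cs (loopB dt.items fuel st) ∧
      (∀ j, st.contains j = true → (loopB dt.items fuel st).contains j = true) ∧
      (∀ p ∈ dt.items, (loopB dt.items fuel st).contains p.1 = true ∨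
        p.2.all (loopB dt.items fuel st).contains = false) := by
  intro fuel
  induction fuel with
  | zero => intro st _ _ h; omega
  | succ fuel ih =>
    intro st hcorr hsub hm
    obtain ⟨h1, h2, h3, h4⟩ := passB_spec dt cs hnd dt.items (fun p hp => hp) st false hcorr hsub
    rw [loopB]
    rcases hp : passB st false dt.items with ⟨st', fl⟩
    rw [hp] at h1 h2 h3 h4
    simp only [] at h1 h2 h3 h4
    cases fl with
    | false =>
      obtain ⟨heq, hfix⟩ := h3 rfl
      simp only [] at heq ⊢
      rw [heq]
      refine ⟨hcorr, fun j h => h, ?_⟩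
      intro p hp'
      rcases hfix p hp' with h | h
      · exact Or.inl h
      · exact Or.inr h
    | true =>
      obtain ⟨j, hj1, hj2, hj3⟩ := h4 trivial rfl
      simp only [] at hj2 ⊢
      have hsub' : ∀ x, cs.contains x = true → st'.contains x = true :=
        fun x h => h2 x (hsub x h)
      have hmlt : dt.keys.countP (fun x => !st'.contains x)
          < dt.keys.countP (fun x => !st.contains x) := by
        apply countP_strict dt.keys (fun x => !st.contains x)
          (fun x => !st'.contains x) ?_ j hj3 (by simp [hj1]) (by simp [hj2])
        intro x _ hx
        simp only [Bool.not_eq_true'] at hx ⊢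
        by_contra hc
        simp only [Bool.not_eq_false] at hc
        rw [h2 x hc] at hx
        exact absurd hx (by simp)
      obtain ⟨hi1, hi2, hi3⟩ := ih st' h1 hsub' (by omega)
      exact ⟨hi1, fun x hx => hi2 x (h2 x hx), hi3⟩

-- a fixpoint store that covers cs contains every solvable node
lemma complete (dt : PySem.Dict Int (List Int)) (cs st : PySem.Dict Int Int)
    (hsub : ∀ j, cs.contains j = true → st.contains j = true)
    (hfix : ∀ p ∈ dt.items, st.contains p.1 = true ∨ p.2.all st.contains = false) :
    ∀ (n : Nat) (k : Int), okT dt cs n k = true → st.contains k = true := by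
  intro n
  induction n with
  | zero =>
    intro k h
    simp only [okT] at h
    exact hsub k h
  | succ n ih =>
    intro k h
    simp only [okT, Bool.or_eq_true] at h
    rcases h with h | h
    · exact hsub k h
    · cases hdt : dt.get? k with
      | none => rw [hdt] at h; exact absurd h (by simp)
      | some ch =>
        rw [hdt] at h
        have hmem : (k, ch) ∈ dt.items := PySem.Dict.mem_items_of_get?_eq_some dt hdt
        rcases hfix (k, ch) hmem with hk | hall
        · exact hk
        · exfalso
          rw [List.all_eq_true] at h
          have : ch.all st.contains = true := by
            rw [List.all_eq_true]
            intro c hc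
            simpa using ih c (by simpa using h c hc)
          rw [this] at hall
          exact absurd hall (by simp)

lemma size_update_le (l : List (Int × List Int)) :
    ∀ (d : PySem.Dict Int (List Int)),
      (l.foldl (fun acc p => acc.insert p.1 p.2) d).size ≤ d.size + l.length := by
  induction l with
  | nil => intro d; simp
  | cons p t ih =>
    intro d
    simp only [List.foldl_cons, List.length_cons]
    have := ih (d.insert p.1 p.2)
    rw [PySem.Dict.size_insert] at this
    split at this <;> omega

lemma size_ofList_le (l : List (Int × List Int)) :
    (PySem.Dict.ofList l : PySem.Dict Int (List Int)).keys.length ≤ l.length := by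
  have h := size_update_le l PySem.Dict.empty
  rw [PySem.Dict.size_empty] at h
  simpa [PySem.Dict.size, PySem.Dict.keys] using h

-- ===== VERDICT =====
theorem total_configurations_spec : Claim_equal_total_configurations := by
  unfold Claim_equal_total_configurations Spec_total_configurations Pre_total_configurations
  intro cur dt_l cs_l _ hpre
  unfold total_configurations total_configurations_alt
  set dt := (PySem.Dict.ofList dt_l : PySem.Dict Int (List Int)) with hdt
  set cs := (PySem.Dict.ofList cs_l : PySem.Dict Int Int) with hcs
  have hnd : dt.keys.Nodup := PySem.Dict.nodup_keys_ofList dt_l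
  have hcorr0 : CorrT dt cs cs := fun j v hj => ⟨0, by simpa [cvT] using hj⟩
  -- A side
  obtain ⟨⟨nA, hA⟩, _, _⟩ := goA_spec dt cs (dt_l.length + 2) cur cs hcorr0
    (fun j h => h) (dt_l.length + 1) hpre (by omega)
  -- B side
  have hmb : dt.keys.countP (fun j => !cs.contains j) < dt_l.length + 1 := by
    have h1 := List.countP_le_length (l := dt.keys) (p := fun j => !cs.contains j)
    have h2 := size_ofList_le dt_l
    rw [← hdt] at h2
    omega
  obtain ⟨hBcorr, _, hBfix⟩ := loopB_spec dt cs hnd (dt_l.length + 1) cs hcorr0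
    (fun j h => h) hmb
  have hBsub : ∀ j, cs.contains j = true →
      (loopB dt.items (dt_l.length + 1) cs).contains j = true :=
    (loopB_spec dt cs hnd (dt_l.length + 1) cs hcorr0 (fun j h => h) hmb).2.1
  have hBk : (loopB dt.items (dt_l.length + 1) cs).contains cur = true :=
    complete dt cs _ hBsub hBfix (dt_l.length + 1) cur hpre
  rw [PySem.Dict.contains_eq_isSome_get?] at hBk
  obtain ⟨vB, hvB⟩ := Option.isSome_iff_exists.mp hBk
  obtain ⟨nB, hB⟩ := hBcorr cur vB hvB
  simp only []
  rw [PySem.Dict.getD_eq_get?_getD, hvB]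
  exact cvT_unique dt cs hA hB
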